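-- pv_equiv track=rewrite | github.com/jJup0/LeetCode | Hard/1510. Stone Game IV.py | winnerSquareGame
-- ===== SOURCE A (Python) =====
-- from math import isqrt
--
-- def winnerSquareGame(n: int) -> bool:
--     # wins[i] stores if game can definitely be won by alice if i rocks at the start of the game
--     wins = [False] * (n + 1)
--
--     # helper function for recursion, memosation list is non local
--     def helper(cur_n: int):
--
--         # if no more rocks left, then lost (return false)
--         if cur_n == 0:
--             return False
--         # if this game is provably winnable return true
--         if wins[cur_n]:
--             return True
--
--         # current player can win if next player can not win
--         can_win = not all(helper(cur_n - i * i) for i in range(isqrt(cur_n), 0, -1))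
--
--         # memoize result
--         wins[cur_n] = can_win
--
--         return can_win
--
--     helper(n)
--     return wins[n]
-- ===== SOURCE B (Python) =====
-- from math import isqrt
--
-- def winnerSquareGame(n: int) -> bool:
--     # Bottom-up iterative DP: fill dp[1..n] in increasing order; dp[i] is True
--     # iff some square move j*j leads to a losing state dp[i-j*j] == False.
--     dp = [False] * (n + 1)
--     for i in range(1, n + 1):
--         j = 1
--         while j * j <= i:
--             if not dp[i - j * j]:
--                 dp[i] = True
--                 break
--             j += 1
--     return dp[n]
-- ===== Notes on version B (the rewrite author's own statement) =====
-- stated objective: simpler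
-- what changed: A is a top-down memoized recursion (nested helper, True-only memo, all() over a generator); B replaces it with a plain bottom-up iterative DP that fills dp[1..n] in increasing order with an inner while loop over squares, no recursion and no helper.
import Mathlib
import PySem

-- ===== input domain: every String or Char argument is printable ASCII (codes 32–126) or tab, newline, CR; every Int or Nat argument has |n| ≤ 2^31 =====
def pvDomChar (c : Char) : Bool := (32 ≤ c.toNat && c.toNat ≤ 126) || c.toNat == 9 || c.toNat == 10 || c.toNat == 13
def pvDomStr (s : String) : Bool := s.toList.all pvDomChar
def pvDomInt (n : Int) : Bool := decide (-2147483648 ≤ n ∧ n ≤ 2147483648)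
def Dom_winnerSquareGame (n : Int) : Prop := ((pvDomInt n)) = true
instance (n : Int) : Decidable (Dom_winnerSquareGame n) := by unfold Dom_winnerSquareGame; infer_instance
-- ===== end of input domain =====

-- B replaces A's top-down memoized recursion (nested helper, True-only memo, all() over a
-- generator) by a plain bottom-up iterative DP table filled once in increasing order; objective: simpler.

-- ===== PORT A =====
-- A's nested `helper` mutates the nonlocal list `wins`; the port threads that list through the
-- recursion.  `allA` is the short-circuiting `all(helper(cur_n - i*i) for i in range(isqrt(cur_n), 0, -1))`,
-- iterating i = isqrt(cur_n) down to 1 (math.isqrt on a nonnegative int is Nat.sqrt, exact).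
-- The extra hypothesis `hc : 0 < c` is a termination guard only: it is always available at the
-- call site, where the `cur_n == 0` branch was not taken.  `wins[cur_n] = can_win` is `Array.setIfInBounds`.
mutual
  def helperA (wins : Array Bool) (c : Nat) : Bool × Array Bool :=
    if hc : c = 0 then (false, wins)
    else if wins.getD c false then (true, wins)
    else
      let p := allA wins c (Nat.sqrt c) (Nat.pos_of_ne_zero hc)
      (!p.1, p.2.setIfInBounds c (!p.1))
  termination_by (c, Nat.sqrt c + 1)
  decreasing_by exact Prod.Lex.right _ (Nat.lt_succ_self _)

  def allA (wins : Array Bool) (c : Nat) (i : Nat) (hc : 0 < c) : Bool × Array Bool :=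
    if hi : i = 0 then (true, wins)
    else
      let q := helperA wins (c - i * i)
      if q.1 then allA q.2 c (i - 1) hc else (false, q.2)
  termination_by (c, i)
  decreasing_by
    · have h2 : 0 < i * i := Nat.mul_pos (by omega) (by omega)
      exact Prod.Lex.left _ _ (by omega)
    · exact Prod.Lex.right _ (by omega)
end

def winnerSquareGame (n : Int) : Bool :=
  -- `if n < 0` guard: outside Pre_ (the Python raises IndexError there)
  if n < 0 then false
  else
    let N := n.toNat
    (helperA (Array.replicate (N + 1) false) N).2.getD N false

-- ===== PORT B =====
-- B is a bottom-up loop: `for i in range(1, n+1)` with an inner `while j*j <= i` that sets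
-- dp[i] = True and breaks at the first losing dp[i - j*j].  `innerB` is that while loop
-- (the break is the early return of the set array), `fillB` the for loop threading dp.
def innerB (dp : Array Bool) (i j : Nat) : Array Bool :=
  if h : j * j ≤ i then
    if dp.getD (i - j * j) false = false then dp.setIfInBounds i true
    else innerB dp i (j + 1)
  else dp
termination_by i + 1 - j
decreasing_by
  rcases Nat.eq_zero_or_pos j with hj | hj
  · omega
  · have h2 : j * 1 ≤ j * j := Nat.mul_le_mul_left j hj
    omega

def fillB (dp : Array Bool) (i n : Nat) : Array Bool :=
  if i ≤ n then fillB (innerB dp i 1) (i + 1) n else dp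
termination_by n + 1 - i

def winnerSquareGame_alt (n : Int) : Bool :=
  if n < 0 then false
  else
    let N := n.toNat
    (fillB (Array.replicate (N + 1) false) 1 N).getD N false

-- ===== PRECONDITION & SPEC =====
-- Pre_ excludes n < 0, on which A raises IndexError (wins = [] and wins[n] is out of range).
def Pre_winnerSquareGame (n : Int) : Prop := 0 ≤ n
instance (n : Int) : Decidable (Pre_winnerSquareGame n) := by unfold Pre_winnerSquareGame; infer_instance
def pvWitness_winnerSquareGame : Int := (7)

def Spec_winnerSquareGame (n : Int) (out : Bool) : Prop := out = winnerSquareGame_alt n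
instance (n : Int) (out : Bool) : Decidable (Spec_winnerSquareGame n out) := by unfold Spec_winnerSquareGame; infer_instance

-- ===== CLAIM (what is proved, stated in full; the proofs are below) =====
def Claim_equal_winnerSquareGame : Prop := ∀ (n : Int), Dom_winnerSquareGame n → Pre_winnerSquareGame n → Spec_winnerSquareGame n (winnerSquareGame n)

-- ===== LEMMAS AND PROOFS =====

-- The game value: with c stones the player to move wins iff some square move leads to a loss.
def W (c : Nat) : Bool :=
  if c = 0 then false
  else !((List.range' 1 (Nat.sqrt c)).attach.all (fun i => W (c - i.1 * i.1)))
termination_by c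
decreasing_by
  rename_i hc
  have hm := (List.mem_range'_1).mp i.2
  have h2 : 0 < i.1 * i.1 := Nat.mul_pos (by omega) (by omega)
  have hsq : i.1 * i.1 ≤ c := Nat.le_sqrt.mp (by omega)
  omega

lemma W_zero : W 0 = false := by simp [W]

lemma W_pos (c : Nat) (hc : c ≠ 0) :
    W c = !((List.range' 1 (Nat.sqrt c)).all (fun i => W (c - i * i))) := by
  rw [W]; simp [hc]

-- unfolding equations for the mutual ports
lemma helperA_zero (wins : Array Bool) : helperA wins 0 = (false, wins) := by
  rw [helperA]; simp

lemma helperA_memo (wins : Array Bool) (c : Nat) (hc : c ≠ 0) (hm : wins.getD c false = true) :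
    helperA wins c = (true, wins) := by
  have hm' : wins[c]?.getD false = true := by
    rw [← Array.getD_eq_getD_getElem?]; exact hm
  rw [helperA]; simp [hc, hm']

lemma helperA_step (wins : Array Bool) (c : Nat) (hc : c ≠ 0) (hm : wins.getD c false = false) :
    helperA wins c =
      (!(allA wins c (Nat.sqrt c) (Nat.pos_of_ne_zero hc)).1,
       (allA wins c (Nat.sqrt c) (Nat.pos_of_ne_zero hc)).2.setIfInBounds c
         (!(allA wins c (Nat.sqrt c) (Nat.pos_of_ne_zero hc)).1)) := by
  have hm' : wins[c]?.getD false = false := by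
    rw [← Array.getD_eq_getD_getElem?]; exact hm
  rw [helperA]; simp [hc, hm']

lemma allA_zero (wins : Array Bool) (c : Nat) (hc : 0 < c) : allA wins c 0 hc = (true, wins) := by
  rw [allA]; simp

lemma allA_succ (wins : Array Bool) (c i : Nat) (hc : 0 < c) (hi : i ≠ 0) :
    allA wins c i hc =
      (if (helperA wins (c - i * i)).1 then allA (helperA wins (c - i * i)).2 c (i - 1) hc
       else (false, (helperA wins (c - i * i)).2)) := by
  rw [allA]; simp [hi]

lemma getD_set_self {α : Type} (a : Array α) (i : Nat) (v d : α) (h : i < a.size) :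
    (a.setIfInBounds i v).getD i d = v := by
  simp [Array.getD_eq_getD_getElem?, h]

lemma getD_set_ne {α : Type} (a : Array α) (i k : Nat) (v d : α) (h : i ≠ k) :
    (a.setIfInBounds i v).getD k d = a.getD k d := by
  simp [Array.getD_eq_getD_getElem?, h]

lemma setIfInBounds_of_ge {α : Type} (a : Array α) (i : Nat) (v : α) (h : a.size ≤ i) :
    a.setIfInBounds i v = a := by
  simp [Array.setIfInBounds, Nat.not_lt.mpr h]

lemma getD_replicate {α : Type} (m k : Nat) (d : α) :
    (Array.replicate m d).getD k d = d := by
  rw [Array.getD_eq_getD_getElem?, Array.getElem?_replicate]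
  split <;> simp

-- Invariant of A's memo list: a stored `true` is a true game value.
def InvA (wins : Array Bool) : Prop := ∀ k, wins.getD k false = true → W k = true

lemma invA_replicate (m : Nat) : InvA (Array.replicate m false) := by
  intro k hk
  rw [Array.getD_eq_getD_getElem?, Array.getElem?_replicate] at hk
  split at hk <;> simp at hk

-- full specification of helperA
def PA (c : Nat) (wins : Array Bool) : Prop :=
  (helperA wins c).1 = W c ∧
  (helperA wins c).2.size = wins.size ∧
  InvA (helperA wins c).2 ∧
  (c < wins.size → (helperA wins c).2.getD c false = W c)

lemma allA_ind (c : Nat)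
    (IH : ∀ c' wins', c' < c → InvA wins' → PA c' wins') :
    ∀ i wins (hc : 0 < c), i * i ≤ c → InvA wins →
      (allA wins c i hc).1 = (List.range' 1 i).all (fun j => W (c - j * j)) ∧
      (allA wins c i hc).2.size = wins.size ∧
      InvA (allA wins c i hc).2 := by
  intro i
  induction i with
  | zero => intro wins hc _ hInv; rw [allA_zero]; simpa using hInv
  | succ i ih =>
    intro wins hc hle hInv
    have hcsub : c - (i + 1) * (i + 1) < c := by
      have h2 : 0 < (i + 1) * (i + 1) := Nat.mul_pos (by omega) (by omega)
      omega
    obtain ⟨hq1, hq2, hq3, -⟩ := IH (c - (i + 1) * (i + 1)) wins hcsub hInv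
    rw [allA_succ _ _ _ _ (by omega)]
    simp only [Nat.add_sub_cancel]
    have hrange : List.range' 1 (i + 1) = List.range' 1 i ++ [1 + i] := by
      simpa using List.range'_concat (s := 1) (n := i) (step := 1)
    have hii : i * i ≤ c := by
      have : i * i ≤ (i + 1) * (i + 1) := Nat.mul_le_mul (Nat.le_succ i) (Nat.le_succ i)
      omega
    cases hres : (helperA wins (c - (i + 1) * (i + 1))).1 with
    | true =>
      obtain ⟨hr1, hr2, hr3⟩ := ih (helperA wins (c - (i + 1) * (i + 1))).2 hc hii hq3
      simp only [if_true]
      have hWt : W (c - (i + 1) * (i + 1)) = true := by rw [← hq1]; exact hres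
      refine ⟨?_, by rw [hr2, hq2], hr3⟩
      rw [hrange, List.all_append]
      simp [hr1, Nat.add_comm 1 i, hWt]
    | false =>
      simp only [Bool.false_eq_true, if_false]
      have hWf : W (c - (i + 1) * (i + 1)) = false := by rw [← hq1]; exact hres
      refine ⟨?_, hq2, hq3⟩
      rw [hrange, List.all_append]
      simp [Nat.add_comm 1 i, hWf]

lemma helperA_spec : ∀ c wins, InvA wins → PA c wins := by
  intro c
  induction c using Nat.strong_induction_on with
  | _ c IH =>
    intro wins hInv
    by_cases hc : c = 0
    · subst hc
      unfold PA
      rw [helperA_zero]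
      refine ⟨W_zero.symm, rfl, hInv, ?_⟩
      intro _
      cases h0 : wins.getD 0 false with
      | false => rw [W_zero]
      | true => exact absurd (hInv 0 h0) (by simp [W_zero])
    · cases hmem : wins.getD c false with
      | true =>
        have hWc : W c = true := hInv c hmem
        unfold PA
        rw [helperA_memo _ _ hc hmem]
        exact ⟨hWc.symm, rfl, hInv, fun _ => by rw [hmem, hWc]⟩
      | false =>
        have hp : 0 < c := Nat.pos_of_ne_zero hc
        obtain ⟨h1, h2, h3⟩ := allA_ind c (fun c' wins' h h' => IH c' h wins' h')
          (Nat.sqrt c) wins hp (Nat.sqrt_le c) hInv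
        have hval : (!(allA wins c (Nat.sqrt c) hp).1) = W c := by
          rw [h1, W_pos c hc]
        unfold PA
        rw [helperA_step _ _ hc hmem]
        refine ⟨hval, by simpa using h2, ?_, ?_⟩
        · intro k hk
          rcases eq_or_ne c k with rfl | hne
          · rcases Nat.lt_or_ge c (allA wins c (Nat.sqrt c) hp).2.size with hlt | hge
            · rw [getD_set_self _ _ _ _ hlt] at hk
              rw [← hval]; exact hk
            · rw [setIfInBounds_of_ge _ _ _ hge] at hk
              exact h3 c hk
          · rw [getD_set_ne _ _ _ _ _ hne] at hk
            exact h3 k hk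
        · intro hlen
          rw [getD_set_self _ _ _ _ (by omega)]
          exact hval

-- B side: the inner while loop either sets dp[i] (first losing move found) or returns dp unchanged.
lemma innerB_eq : ∀ (fuel : Nat) (dp : Array Bool) (i j : Nat), Nat.sqrt i + 1 - j ≤ fuel → 1 ≤ j →
    (∀ k, k < i → dp.getD k false = W k) →
    innerB dp i j =
      if (List.range' j (Nat.sqrt i + 1 - j)).any (fun t => !W (i - t * t)) then
        dp.setIfInBounds i true
      else dp := by
  intro fuel
  induction fuel with
  | zero =>
    intro dp i j hf hj hcor
    have hgt : ¬ j * j ≤ i := by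
      intro hle
      have := Nat.le_sqrt.mpr hle
      omega
    rw [innerB]
    simp [hgt, Nat.sub_eq_zero_of_le (by omega : Nat.sqrt i + 1 ≤ j)]
  | succ fuel ih =>
    intro dp i j hf hj hcor
    rw [innerB]
    by_cases hle : j * j ≤ i
    · have hjs : j ≤ Nat.sqrt i := Nat.le_sqrt.mpr hle
      have hm : Nat.sqrt i + 1 - j = (Nat.sqrt i + 1 - (j + 1)) + 1 := by omega
      have hrange : List.range' j (Nat.sqrt i + 1 - j) =
          j :: List.range' (j + 1) (Nat.sqrt i + 1 - (j + 1)) := by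
        rw [hm, List.range'_succ]
      have hsub : i - j * j < i := by
        have : 0 < j * j := Nat.mul_pos (by omega) (by omega)
        omega
      have hd : dp.getD (i - j * j) false = W (i - j * j) := hcor _ hsub
      simp only [hle, dif_pos]
      cases hW : W (i - j * j) with
      | false =>
        rw [hd, hW]
        simp [hrange, hW]
      | true =>
        rw [hd, hW]
        simp only [Bool.true_eq_false, if_false]
        rw [ih dp i (j + 1) (by omega) (by omega) hcor, hrange]
        have hcond : ((j :: List.range' (j + 1) (Nat.sqrt i + 1 - (j + 1))).any fun t => !W (i - t * t))
            = ((List.range' (j + 1) (Nat.sqrt i + 1 - (j + 1))).any fun t => !W (i - t * t)) := by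
          rw [List.any_cons, hW]
          rfl
        rw [hcond]
    · have hz : Nat.sqrt i + 1 - j = 0 := by
        have hlt : Nat.sqrt i < j := by
          by_contra hlt
          exact hle (Nat.le_sqrt.mp (by omega))
        omega
      rw [dif_neg hle, hz]
      simp

lemma innerB_getD_self (dp : Array Bool) (i : Nat) (hi : i < dp.size) (hi0 : i ≠ 0)
    (hcor : ∀ k, k < i → dp.getD k false = W k) (h0 : dp.getD i false = false) :
    (innerB dp i 1).getD i false = W i := by
  rw [innerB_eq (Nat.sqrt i + 1) dp i 1 (by omega) (by omega) hcor]
  have hW : W i = (List.range' 1 (Nat.sqrt i)).any (fun t => !W (i - t * t)) := by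
    rw [W_pos i hi0]
    simp [List.all_eq_not_any_not]
  simp only [Nat.add_sub_cancel]
  by_cases hany : ((List.range' 1 (Nat.sqrt i)).any fun t => !W (i - t * t)) = true
  · rw [if_pos hany, getD_set_self _ _ _ _ hi, hW, hany]
  · rw [if_neg hany, h0, hW]
    simpa using hany

lemma innerB_getD_other (dp : Array Bool) (i j k : Nat) (hf : Nat.sqrt i + 1 - j ≤ Nat.sqrt i + 1)
    (hj : 1 ≤ j) (hcor : ∀ k', k' < i → dp.getD k' false = W k') (hne : i ≠ k) :
    (innerB dp i j).getD k false = dp.getD k false := by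
  rw [innerB_eq (Nat.sqrt i + 1) dp i j hf hj hcor]
  split
  · exact getD_set_ne _ _ _ _ _ hne
  · rfl

lemma innerB_size (dp : Array Bool) (i j : Nat)
    (hj : 1 ≤ j) (hcor : ∀ k', k' < i → dp.getD k' false = W k') :
    (innerB dp i j).size = dp.size := by
  rw [innerB_eq (Nat.sqrt i + 1) dp i j (by omega) hj hcor]
  split <;> simp

-- the outer for loop fills dp[1..n] left to right
lemma fillB_spec : ∀ (fuel : Nat) (dp : Array Bool) (i n : Nat), n + 1 - i ≤ fuel →
    dp.size = n + 1 → 1 ≤ i →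
    (∀ k, k < i → dp.getD k false = W k) →
    (∀ k, i ≤ k → dp.getD k false = false) →
    ∀ k, k ≤ n → (fillB dp i n).getD k false = W k := by
  intro fuel
  induction fuel with
  | zero =>
    intro dp i n hf hsz hi hcor hfalse k hk
    have hni : ¬ i ≤ n := by omega
    rw [fillB]
    simp only [hni, if_false]
    exact hcor k (by omega)
  | succ fuel ih =>
    intro dp i n hf hsz hi hcor hfalse k hk
    by_cases hin : i ≤ n
    · rw [fillB]
      simp only [hin, if_true]
      refine ih (innerB dp i 1) (i + 1) n (by omega) ?_ (by omega) ?_ ?_ k hk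
      · rw [innerB_size dp i 1 (by omega) hcor]; exact hsz
      · intro k' hk'
        rcases eq_or_ne i k' with rfl | hne
        · exact innerB_getD_self dp i (by omega) (by omega) hcor (hfalse i (le_refl i))
        · rw [innerB_getD_other dp i 1 k' (by omega) (by omega) hcor hne]
          exact hcor k' (by omega)
      · intro k' hk'
        rw [innerB_getD_other dp i 1 k' (by omega) (by omega) hcor (by omega)]
        exact hfalse k' (by omega)
    · rw [fillB]
      simp only [hin, if_false]
      exact hcor k (by omega)

-- ===== VERDICT (by name: the statement is the Claim_ definition above) =====
theorem winnerSquareGame_spec : Claim_equal_winnerSquareGame := by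
  intro n _ hpre
  unfold Spec_winnerSquareGame winnerSquareGame winnerSquareGame_alt
  have hn : ¬ n < 0 := not_lt.mpr hpre
  simp only [hn, if_false]
  have hA := helperA_spec n.toNat (Array.replicate (n.toNat + 1) false) (invA_replicate (n.toNat + 1))
  have hAv : (helperA (Array.replicate (n.toNat + 1) false) n.toNat).2.getD n.toNat false = W n.toNat :=
    hA.2.2.2 (by simp)
  have hB : (fillB (Array.replicate (n.toNat + 1) false) 1 n.toNat).getD n.toNat false = W n.toNat := by
    refine fillB_spec (n.toNat + 1) _ 1 n.toNat (by omega) (by simp) (by omega) ?_ ?_ n.toNat (le_refl _)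
    · intro k hk
      interval_cases k
      rw [getD_replicate, W_zero]
    · intro k _
      exact getD_replicate _ _ _
  rw [hAv, hB]
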